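-- pv_equiv track=rewrite | github.com/PsimonL/Cryptography | Lab3/lab3_2.py | generate_key_stream
-- ===== SOURCE A (Python) =====
-- def generate_key_stream(initial_vector, length):
--     """
--     Generates a key stream based on the linear recurrence relation z_{i+5} = (z_i + z_{i+3}) mod 2.
--
--     Parameters:
--     initial_vector (list of int): The initial vector [z0, z1, z2, z3, z4] to start the recurrence.
--     length (int): The length of the key stream to generate.
--
--     Returns:
--     list of int: Generated key stream of specified length.
--     """
--     z = list(initial_vector)
--     stream = z[:]
--
--     for _ in range(length - len(z)):
--         new_bit = (z[0] + z[3]) % 2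
--         z.append(new_bit)
--         stream.append(new_bit)
--         z.pop(0)
--
--     return stream
-- ===== SOURCE B (Python) =====
-- def generate_key_stream(initial_vector, length):
--     out = list(initial_vector)
--     n = len(out)
--     out += [0] * (length - n)
--     for i in range(length - n):
--         out[i + n] = (out[i] + out[i + 3]) % 2
--     return out
-- ===== Notes on version B (the rewrite author's own statement) =====
-- stated objective: alternative
-- what changed: Replaces A's maintained sliding window z (append + pop(0) each step, plus a separate stream copy) by a preallocated output array of the final length that is filled in place, reading the taps positionally at out[i] and out[i+3].
import Mathlib
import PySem

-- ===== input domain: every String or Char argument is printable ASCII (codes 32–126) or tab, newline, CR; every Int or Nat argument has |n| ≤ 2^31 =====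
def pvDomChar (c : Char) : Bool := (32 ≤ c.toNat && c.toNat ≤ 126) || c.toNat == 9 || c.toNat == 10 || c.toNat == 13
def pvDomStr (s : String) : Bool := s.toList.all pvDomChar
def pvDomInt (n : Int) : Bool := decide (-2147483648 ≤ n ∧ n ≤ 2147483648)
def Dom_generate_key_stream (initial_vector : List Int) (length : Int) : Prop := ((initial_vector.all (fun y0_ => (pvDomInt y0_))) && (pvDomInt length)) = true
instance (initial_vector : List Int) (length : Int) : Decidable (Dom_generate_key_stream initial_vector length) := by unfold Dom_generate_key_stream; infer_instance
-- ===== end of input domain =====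

-- B replaces A's maintained sliding window z (append + pop(0) each step, plus the
-- separate stream copy) by a preallocated output array filled in place positionally.

-- ===== PORT A =====
-- loop over range(length - len(z)), state (z, stream); z.append then z.pop(0)
def genKSLoopA (z stream : List Int) : Nat → List Int
  | 0 => stream
  | k + 1 =>
    let nb := PySem.Int.mod ((PySem.List.pyGet? z 0).getD 0 + (PySem.List.pyGet? z 3).getD 0) 2
    genKSLoopA ((z ++ [nb]).drop 1) (stream ++ [nb]) k

def generate_key_stream (initial_vector : List Int) (length : Int) : List Int :=
  genKSLoopA initial_vector initial_vector (length - (initial_vector.length : Int)).toNat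

-- ===== PORT B =====
-- for i in range(length - n): out[i + n] = (out[i] + out[i + 3]) % 2
-- (under Pre_ every index is in range; out-of-range reads default to 0, writes are List.set)
def genFillB (n : Nat) : Nat → Nat → List Int → List Int
  | 0, _, out => out
  | k + 1, i, out =>
    let v := PySem.Int.mod ((PySem.List.pyGet? out (i : Int)).getD 0 + (PySem.List.pyGet? out ((i : Int) + 3)).getD 0) 2
    genFillB n k (i + 1) (out.set (i + n) v)

def generate_key_stream_alt (initial_vector : List Int) (length : Int) : List Int :=
  let k := (length - (initial_vector.length : Int)).toNat
  genFillB initial_vector.length k 0 (initial_vector ++ List.replicate k 0)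

-- ===== PRECONDITION & SPEC =====
-- Pre_ excludes exactly the inputs where A raises IndexError: a vector shorter than 4
-- while the loop must generate at least one bit.
def Pre_generate_key_stream (initial_vector : List Int) (length : Int) : Prop :=
  length ≤ (initial_vector.length : Int) ∨ 4 ≤ initial_vector.length
instance (initial_vector : List Int) (length : Int) : Decidable (Pre_generate_key_stream initial_vector length) := by unfold Pre_generate_key_stream; infer_instance

def pvWitness_generate_key_stream : List Int × Int := ([1, 0, 1, 1, 0], 9)

def Spec_generate_key_stream (initial_vector : List Int) (length : Int) (out : List Int) : Prop := out = generate_key_stream_alt initial_vector length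
instance (initial_vector : List Int) (length : Int) (out : List Int) : Decidable (Spec_generate_key_stream initial_vector length out) := by unfold Spec_generate_key_stream; infer_instance

-- ===== CLAIM (what is proved, stated in full; the proofs are below) =====
def Claim_equal_generate_key_stream : Prop := ∀ (initial_vector : List Int) (length : Int), Dom_generate_key_stream initial_vector length → Pre_generate_key_stream initial_vector length → Spec_generate_key_stream initial_vector length (generate_key_stream initial_vector length)

-- ===== LEMMAS AND PROOFS =====

-- Invariant: A's window z is the suffix stream.drop i, B's array is stream ++ zeros with
-- the write cursor at position stream.length = i + n; with i + 4 ≤ stream.length both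
-- taps read the same cells of stream and B's in-place write appends the same bit.
theorem genKSLoop_eq (k : Nat) : ∀ (stream : List Int) (i n : Nat),
    i + 4 ≤ stream.length → i + n = stream.length →
    genKSLoopA (stream.drop i) stream k = genFillB n k i (stream ++ List.replicate k 0) := by
  induction k with
  | zero => intro stream i n h hn; simp [genKSLoopA, genFillB]
  | succ k ih =>
    intro stream i n h hn
    have h0 : PySem.List.pyGet? (stream.drop i) 0 = PySem.List.pyGet? (stream ++ List.replicate (k+1) 0) (i : Int) := by
      rw [PySem.List.pyGet?_natCast]
      rw [show ((0 : Int)) = ((0 : Nat) : Int) by rfl, PySem.List.pyGet?_natCast]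
      simp [List.getElem?_drop, List.getElem?_append_left (show i < stream.length by omega)]
    have h3 : PySem.List.pyGet? (stream.drop i) 3 = PySem.List.pyGet? (stream ++ List.replicate (k+1) 0) ((i : Int) + 3) := by
      rw [show ((i : Int) + 3) = (((i + 3 : Nat)) : Int) by push_cast; ring, PySem.List.pyGet?_natCast]
      rw [show ((3 : Int)) = ((3 : Nat) : Int) by rfl, PySem.List.pyGet?_natCast]
      simp [List.getElem?_drop, List.getElem?_append_left (show i + 3 < stream.length by omega)]
    have hdrop : ∀ nb : Int, (stream.drop i ++ [nb]).drop 1 = (stream ++ [nb]).drop (i + 1) := by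
      intro nb
      rw [List.drop_append_of_le_length (by simp; omega), List.drop_append_of_le_length (by omega),
        List.drop_drop]
    have hset : ∀ nb : Int, (stream ++ List.replicate (k + 1) 0).set (i + n) nb
        = (stream ++ [nb]) ++ List.replicate k 0 := by
      intro nb
      rw [show List.replicate (k + 1) (0 : Int) = 0 :: List.replicate k 0 from rfl]
      rw [List.set_append, if_neg (by omega), show i + n - stream.length = 0 by omega]
      simp
    simp only [genKSLoopA, genFillB, h0, h3, hdrop, hset]
    exact ih (stream ++ [_]) (i + 1) n (by simp; omega) (by simp; omega)
theorem generate_key_stream_spec : Claim_equal_generate_key_stream := by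
  intro iv length _ hpre
  unfold Spec_generate_key_stream generate_key_stream generate_key_stream_alt
  by_cases h4 : 4 ≤ iv.length
  · have := genKSLoop_eq (length - (iv.length : Int)).toNat iv 0 iv.length (by omega) (by omega)
    simpa using this
  · have hk : (length - (iv.length : Int)).toNat = 0 := by
      rcases hpre with h | h
      · omega
      · omega
    rw [hk]; simp [genKSLoopA, genFillB]
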